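-- pv_equiv track=rewrite | github.com/Derrick015/Tabulify_PDF | modules/pdf_extraction.py | _coalesce_page_indices_to_ranges
-- ===== SOURCE A (Python) =====
-- from typing import Iterable, List, Dict, Tuple, Set, Callable, Optional
--
-- def _coalesce_page_indices_to_ranges(page_indices: Iterable[int]) -> List[Tuple[int, int]]:
--     """
--     Convert a collection of 0-indexed page indices into inclusive ranges
--     suitable for PyMuPDF's insert_pdf (from_page/to_page inclusive).
--
--     Example: [0,1,2, 4,5, 9] -> [(0,2), (4,5), (9,9)]
--     """
--     unique_sorted = sorted(set(int(i) for i in page_indices))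
--     if not unique_sorted:
--         return []
--
--     ranges: List[Tuple[int, int]] = []
--     start = unique_sorted[0]
--     prev = start
--
--     for idx in unique_sorted[1:]:
--         if idx == prev + 1:
--             prev = idx
--             continue
--         ranges.append((start, prev))
--         start = idx
--         prev = idx
--     ranges.append((start, prev))
--     return ranges
-- ===== SOURCE B (Python) =====
-- from itertools import groupby
-- from typing import Iterable, List, Tuple
--
-- def _coalesce_page_indices_to_ranges(page_indices: Iterable[int]) -> List[Tuple[int, int]]:
--     unique_sorted = sorted(set(int(i) for i in page_indices))
--     out: List[Tuple[int, int]] = []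
--     for _, grp in groupby(enumerate(unique_sorted), key=lambda p: p[1] - p[0]):
--         g = list(grp)
--         out.append((g[0][1], g[-1][1]))
--     return out
-- ===== Notes on version B (the rewrite author's own statement) =====
-- stated objective: idiomatic
-- what changed: Replaced the explicit start/prev run-tracking loop with itertools.groupby over enumerate(unique_sorted) keyed by value-minus-index, emitting each group's first and last value as the inclusive range.
import Mathlib
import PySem

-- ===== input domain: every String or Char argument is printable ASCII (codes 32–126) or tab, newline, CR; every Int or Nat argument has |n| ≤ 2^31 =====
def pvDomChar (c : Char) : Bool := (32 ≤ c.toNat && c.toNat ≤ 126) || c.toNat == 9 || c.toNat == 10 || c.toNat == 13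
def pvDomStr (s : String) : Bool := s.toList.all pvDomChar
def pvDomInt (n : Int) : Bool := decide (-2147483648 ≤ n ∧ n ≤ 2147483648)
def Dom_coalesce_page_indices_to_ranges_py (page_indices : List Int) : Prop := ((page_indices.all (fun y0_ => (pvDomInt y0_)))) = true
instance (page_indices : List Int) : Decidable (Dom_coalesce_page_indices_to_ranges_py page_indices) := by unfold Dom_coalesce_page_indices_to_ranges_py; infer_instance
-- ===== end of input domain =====

-- B replaces A's explicit start/prev run-tracking loop with groupby(enumerate(...)) keyed by
-- value-minus-index (idiomatic; same cost). Equivalence of the RETURN value is proved for all inputs.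

-- ===== PORT A =====
-- the body of A's for-loop, state (ranges, start, prev)
def pvStepA (acc : List (Int × Int) × Int × Int) (idx : Int) : List (Int × Int) × Int × Int :=
  if idx = acc.2.2 + 1 then (acc.1, acc.2.1, idx)
  else (acc.1 ++ [(acc.2.1, acc.2.2)], idx, idx)

def coalesce_page_indices_to_ranges_py (page_indices : List Int) : List (Int × Int) :=
  let unique_sorted := PySem.List.sorted (PySem.Set.ofList page_indices) (fun x => x) false
  match unique_sorted with
  | [] => []
  | start :: rest =>
    let st := rest.foldl pvStepA ([], start, start)
    st.1 ++ [(st.2.1, st.2.2)]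

-- ===== PORT B =====
-- itertools.groupby: maximal runs of equal key (key equality is transitive, so run = takeWhile on the head's key)
def pvKeyEq (k : Int) (q : Int × Int) : Bool := (q.2 - q.1) == k

def pvGroups : List (Int × Int) → List (List (Int × Int))
  | [] => []
  | p :: rest =>
    (p :: rest.takeWhile (pvKeyEq (p.2 - p.1))) ::
      pvGroups (rest.dropWhile (pvKeyEq (p.2 - p.1)))
  termination_by l => l.length
  decreasing_by
    simp only [List.length_cons]
    exact Nat.lt_succ_of_le (List.length_dropWhile_le _ _)

def coalesce_page_indices_to_ranges_py_alt (page_indices : List Int) : List (Int × Int) :=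
  let unique_sorted := PySem.List.sorted (PySem.Set.ofList page_indices) (fun x => x) false
  (pvGroups (PySem.List.enumerate unique_sorted 0)).map
    (fun g => ((g.headD (0, 0)).2, (g.getLastD (0, 0)).2))

-- ===== PRECONDITION & SPEC =====
def Spec_coalesce_page_indices_to_ranges_py (page_indices : List Int) (out : List (Int × Int)) : Prop := out = coalesce_page_indices_to_ranges_py_alt page_indices
instance (page_indices : List Int) (out : List (Int × Int)) : Decidable (Spec_coalesce_page_indices_to_ranges_py page_indices out) := by unfold Spec_coalesce_page_indices_to_ranges_py; infer_instance

-- ===== CLAIM (what is proved, stated in full; the proofs are below) =====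
def Claim_equal_coalesce_page_indices_to_ranges_py : Prop := ∀ (page_indices : List Int), Dom_coalesce_page_indices_to_ranges_py page_indices → Spec_coalesce_page_indices_to_ranges_py page_indices (coalesce_page_indices_to_ranges_py page_indices)

-- ===== LEMMAS AND PROOFS =====

-- common reference recursion both ports are reduced to
def pvCoalRec (start prev : Int) : List Int → List (Int × Int)
  | [] => [(start, prev)]
  | x :: xs => if x = prev + 1 then pvCoalRec start x xs else (start, prev) :: pvCoalRec x x xs

def pvSetStart (s : Int) : List (Int × Int) → List (Int × Int)
  | [] => []
  | (_, b) :: t => (s, b) :: t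

theorem pvCoalRec_setStart (xs : List Int) : ∀ s s' p : Int,
    pvCoalRec s p xs = pvSetStart s (pvCoalRec s' p xs) := by
  induction xs with
  | nil => intro s s' p; simp [pvCoalRec, pvSetStart]
  | cons x t ih =>
    intro s s' p
    by_cases h : x = p + 1
    · simp only [pvCoalRec, if_pos h]; exact ih s s' x
    · simp only [pvCoalRec, if_neg h, pvSetStart]

theorem pvFoldA (xs : List Int) : ∀ (acc : List (Int × Int)) (s p : Int),
    (let st := xs.foldl pvStepA (acc, s, p); st.1 ++ [(st.2.1, st.2.2)]) = acc ++ pvCoalRec s p xs := by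
  induction xs with
  | nil => intro acc s p; simp [pvCoalRec]
  | cons x t ih =>
    intro acc s p
    by_cases h : x = p + 1 <;>
      simp [pvStepA, h, pvCoalRec, ih, List.append_assoc]

theorem pvGroups_cons (p : Int × Int) (rest : List (Int × Int)) :
    pvGroups (p :: rest) =
      (p :: rest.takeWhile (pvKeyEq (p.2 - p.1))) ::
        pvGroups (rest.dropWhile (pvKeyEq (p.2 - p.1))) := by
  rw [pvGroups]

theorem pvGroupsB (xs : List Int) : ∀ (n p : Int),
    (pvGroups (PySem.List.enumerate (p :: xs) n)).map
        (fun g => ((g.headD (0, 0)).2, (g.getLastD (0, 0)).2)) = pvCoalRec p p xs := by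
  induction xs with
  | nil =>
    intro n p
    simp [PySem.List.enumerate_cons, PySem.List.enumerate_nil, pvGroups_cons, pvGroups, pvCoalRec]
  | cons x t ih =>
    intro n p
    rw [PySem.List.enumerate_cons, pvGroups_cons]
    by_cases h : x = p + 1
    · have hk : p - n = x - (n + 1) := by omega
      have hx : pvKeyEq (x - (n + 1)) ((n + 1), x) = true := by simp [pvKeyEq]
      rw [PySem.List.enumerate_cons]
      simp only [List.takeWhile_cons, List.dropWhile_cons, hk, hx, if_true]
      have ih' := ih (n + 1) x
      rw [PySem.List.enumerate_cons, pvGroups_cons] at ih'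
      simp only [List.map_cons, List.getLastD_cons, List.headD] at ih' ⊢
      rw [pvCoalRec, if_pos h, pvCoalRec_setStart t p x x, ← ih']
      simp [pvSetStart]
    · have hx : pvKeyEq (p - n) ((n + 1), x) = false := by
        simp [pvKeyEq]; omega
      rw [PySem.List.enumerate_cons]
      simp only [List.takeWhile_cons, List.dropWhile_cons, hx]
      simp only [Bool.false_eq_true, if_false, List.map_cons]
      rw [← PySem.List.enumerate_cons, ih (n + 1) x]
      simp [pvCoalRec, h]

-- ===== VERDICT (by name: the statement is the Claim_ definition above) =====
theorem coalesce_page_indices_to_ranges_py_spec : Claim_equal_coalesce_page_indices_to_ranges_py := by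
  intro page_indices _
  unfold Spec_coalesce_page_indices_to_ranges_py
  unfold coalesce_page_indices_to_ranges_py coalesce_page_indices_to_ranges_py_alt
  cases hus : PySem.List.sorted (PySem.Set.ofList page_indices) (fun x => x) false with
  | nil => simp [PySem.List.enumerate_nil, pvGroups]
  | cons s rest =>
    simp only []
    rw [pvGroupsB rest 0 s]
    have := pvFoldA rest [] s s
    simpa using this
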